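-- pv_equiv track=rewrite | github.com/Hongxux/videoToMarkdown2 | services/python_grpc/src/content_pipeline/common/utils/json_payload_repair.py | extract_top_level_objects
-- ===== SOURCE A (Python) =====
-- from typing import Any, Callable, Dict, List, Optional, Sequence, Tuple
--
-- def extract_top_level_objects(text: str) -> List[str]:
--     if not text:
--         return []
--     objs: List[str] = []
--     depth = 0
--     start_idx: Optional[int] = None
--     in_str = False
--     quote = ""
--     escape = False
--
--     for i, ch in enumerate(text):
--         if in_str:
--             if escape:
--                 escape = False
--                 continue
--             if ch == "\\":
--                 escape = True
--                 continue
--             if ch == quote: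
--                 in_str = False
--                 quote = ""
--             continue
--
--         if ch in {"\"", "'"}:
--             in_str = True
--             quote = ch
--             continue
--         if ch == "{":
--             if depth == 0:
--                 start_idx = i
--             depth += 1
--             continue
--         if ch == "}" and depth > 0:
--             depth -= 1
--             if depth == 0 and start_idx is not None:
--                 segment = text[start_idx : i + 1].strip()
--                 if segment:
--                     objs.append(segment)
--                 start_idx = None
--     return objs
-- ===== SOURCE B (Python) =====
-- from typing import List, Tuple
--
--
-- def structural_regions(text: str) -> List[Tuple[int, int]]:
--     """Half-open intervals [a, b) of text lying outside string literals."""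
--     n = len(text)
--     regions: List[Tuple[int, int]] = []
--     i = 0
--     while i < n:
--         j = i
--         while j < n and text[j] not in "\"'":
--             j += 1
--         regions.append((i, j))
--         if j >= n:
--             break
--         q = text[j]
--         k = j + 1
--         while k < n:
--             if text[k] == "\\":
--                 k += 2
--             elif text[k] == q:
--                 k += 1
--                 break
--             else:
--                 k += 1
--         i = k
--     return regions
--
--
-- def extract_top_level_objects(text: str) -> List[str]:
--     # stage 1: where is code (not string literal content)?
--     regions = structural_regions(text)
--     # stage 2: the structural brace events, in order
--     events = [(p, text[p]) for a, b in regions for p in range(a, b) if text[p] in "{}"]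
--     # stage 3: match braces by depth over the event list
--     objs: List[str] = []
--     depth = 0
--     start = 0
--     for p, c in events:
--         if c == "{":
--             if depth == 0:
--                 start = p
--             depth += 1
--         elif depth > 0:
--             depth -= 1
--             if depth == 0:
--                 objs.append(text[start:p + 1])
--     return objs
-- ===== Notes on version B (the rewrite author's own statement) =====
-- stated objective: alternative
-- what changed: A's single pass threading in_str/quote/escape flags per character is replaced by a staged pipeline: stage 1 computes the list of half-open intervals of text lying outside string literals, stage 2 flattens them into an ordered list of structural brace events via a comprehension, stage 3 folds a depth counter over that event list to slice out top-level objects (A's strip/non-empty check is a proved no-op).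
import Mathlib
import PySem

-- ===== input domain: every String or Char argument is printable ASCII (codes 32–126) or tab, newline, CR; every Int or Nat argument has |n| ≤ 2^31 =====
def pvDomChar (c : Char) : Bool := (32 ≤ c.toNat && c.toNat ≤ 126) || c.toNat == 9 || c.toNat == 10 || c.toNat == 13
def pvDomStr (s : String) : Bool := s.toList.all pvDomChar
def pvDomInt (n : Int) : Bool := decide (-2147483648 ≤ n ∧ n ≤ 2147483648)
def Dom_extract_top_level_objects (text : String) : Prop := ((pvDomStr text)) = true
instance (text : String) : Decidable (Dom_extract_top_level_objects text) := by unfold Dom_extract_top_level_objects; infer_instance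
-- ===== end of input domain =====

-- B replaces A's flag-threading single pass by a staged pipeline: stage 1 computes the half-open
-- intervals of text lying outside string literals, stage 2 flattens them into the ordered list of
-- structural brace events, stage 3 folds a depth counter over the events and slices out the
-- top-level objects; A's strip/non-empty check is a no-op (every segment starts '{' and ends '}').


-- ===== PORT A =====
-- state = (objs, depth, start_idx, in_str, quote, escape); quote "" is modelled as none
def pvAStep (cs : List Char) (st : List String × Int × Option Int × Bool × Option Char × Bool)
    (p : Int × Char) : List String × Int × Option Int × Bool × Option Char × Bool :=
  let (objs, depth, start, inStr, quote, escape) := st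
  let (i, ch) := p
  if inStr then
    if escape then (objs, depth, start, inStr, quote, false)
    else if ch = '\\' then (objs, depth, start, inStr, quote, true)
    else if some ch = quote then (objs, depth, start, false, none, escape)
    else st
  else if ch = '"' ∨ ch = '\'' then (objs, depth, start, true, some ch, escape)
  else if ch = '{' then
    (objs, depth + 1, if depth = 0 then some i else start, inStr, quote, escape)
  else if ch = '}' ∧ depth > 0 then
    let depth' := depth - 1
    if depth' = 0 ∧ start.isSome then
      let segment := PySem.Chars.strip (PySem.List.slice cs (some (start.getD 0)) (some (i + 1)))
      ((if segment ≠ [] then objs ++ [String.ofList segment] else objs), depth', none, inStr, quote, escape)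
    else (objs, depth', start, inStr, quote, escape)
  else st

def extract_top_level_objects (text : String) : List String :=
  if text = "" then []
  else
    ((PySem.List.enumerate text.toList 0).foldl (pvAStep text.toList)
      ([], 0, none, false, none, false)).1

-- ===== PORT B =====
-- the while-loops are transliterated with explicit fuel counters (a pure totality device: the
-- quote-search index and the skip index advance by at least one per iteration, the outer loop's
-- start index strictly increases)

-- inner loop: while j < n and text[j] not in "\"'": j += 1
def pvFindQ (cs : List Char) (n : Nat) : Nat → Nat → Nat
  | 0, j => j
  | f + 1, j =>
    if j < n ∧ ¬(cs.getD j ' ' = '"' ∨ cs.getD j ' ' = '\'') then pvFindQ cs n f (j + 1) else j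

-- inner loop: while k < n: backslash → k += 2 / closing quote → k += 1, break / else k += 1
def pvSkipK (cs : List Char) (n : Nat) (q : Char) : Nat → Nat → Nat
  | 0, k => k
  | f + 1, k =>
    if k < n then
      if cs.getD k ' ' = '\\' then pvSkipK cs n q f (k + 2)
      else if cs.getD k ' ' = q then k + 1
      else pvSkipK cs n q f (k + 1)
    else k

-- stage 1: structural_regions (the loop variable j = pvFindQ cs n n i is written inline)
def pvRegionsGo (cs : List Char) (n : Nat) : Nat → Nat → List (Nat × Nat)
  | 0, _ => []
  | f + 1, i =>
    if i < n then
      if n ≤ pvFindQ cs n n i then [(i, pvFindQ cs n n i)]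
      else (i, pvFindQ cs n n i) ::
        pvRegionsGo cs n f
          (pvSkipK cs n (cs.getD (pvFindQ cs n n i) ' ') n (pvFindQ cs n n i + 1))
    else []

-- stage 2: the brace-event comprehension
def pvEvents (cs : List Char) (regs : List (Nat × Nat)) : List (Nat × Char) :=
  regs.flatMap (fun ab =>
    (List.range' ab.1 (ab.2 - ab.1)).filterMap (fun p =>
      if cs.getD p ' ' = '{' ∨ cs.getD p ' ' = '}' then some (p, cs.getD p ' ') else none))

-- stage 3: one fold step over an event
def pvBStep (cs : List Char) (st : List String × Nat × Nat) (e : Nat × Char) :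
    List String × Nat × Nat :=
  let (objs, depth, start) := st
  let (p, c) := e
  if c = '{' then (objs, depth + 1, if depth = 0 then p else start)
  else if 0 < depth then
    if depth - 1 = 0 then
      (objs ++ [String.ofList ((cs.drop start).take (p + 1 - start))], depth - 1, start)
    else (objs, depth - 1, start)
  else st

def extract_top_level_objects_alt (text : String) : List String :=
  let cs := text.toList
  let n := cs.length
  ((pvEvents cs (pvRegionsGo cs n (n + 1) 0)).foldl (pvBStep cs) ([], 0, 0)).1

-- ===== PRECONDITION & SPEC =====
def Spec_extract_top_level_objects (text : String) (out : List String) : Prop := out = extract_top_level_objects_alt text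
instance (text : String) (out : List String) : Decidable (Spec_extract_top_level_objects text out) := by unfold Spec_extract_top_level_objects; infer_instance

-- ===== CLAIM (what is proved, stated in full; the proofs are below) =====
def Claim_equal_extract_top_level_objects : Prop := ∀ (text : String), Dom_extract_top_level_objects text → Spec_extract_top_level_objects text (extract_top_level_objects text)

-- ===== LEMMAS AND PROOFS =====

-- canonical-fuel abbreviation for B's event list starting at position k
def pvEvF (cs : List Char) (k : Nat) : List (Nat × Char) :=
  pvEvents cs (pvRegionsGo cs cs.length (cs.length + 1) k)

theorem pvFindQ_spec (cs : List Char) (n : Nat) :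
    ∀ (f j : Nat), j ≤ n → n ≤ j + f →
      j ≤ pvFindQ cs n f j ∧ pvFindQ cs n f j ≤ n ∧
        (pvFindQ cs n f j = n ∨
          (pvFindQ cs n f j < n ∧ (cs.getD (pvFindQ cs n f j) ' ' = '"' ∨ cs.getD (pvFindQ cs n f j) ' ' = '\''))) := by
  intro f
  induction f with
  | zero => intro j h1 h2; rw [pvFindQ]; exact ⟨le_refl j, h1, Or.inl (by omega)⟩
  | succ f ihf =>
    intro j h1 h2
    rw [pvFindQ]
    by_cases hc : j < n ∧ ¬(cs.getD j ' ' = '"' ∨ cs.getD j ' ' = '\'')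
    · rw [if_pos hc]
      have := ihf (j + 1) (by omega) (by omega)
      exact ⟨by omega, this.2.1, this.2.2⟩
    · rw [if_neg hc]
      refine ⟨le_refl j, h1, ?_⟩
      by_cases hj : j < n
      · right; exact ⟨hj, by tauto⟩
      · left; omega

theorem pvFindQ_congr (cs : List Char) (n : Nat) :
    ∀ (f1 f2 j : Nat), n ≤ j + f1 → n ≤ j + f2 →
      pvFindQ cs n f1 j = pvFindQ cs n f2 j := by
  intro f1
  induction f1 with
  | zero =>
    intro f2 j h1 h2
    cases f2 with
    | zero => rfl
    | succ f2 => rw [pvFindQ, pvFindQ, if_neg (by rintro ⟨h, -⟩; omega)]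
  | succ f1 ihf =>
    intro f2 j h1 h2
    by_cases hc : j < n ∧ ¬(cs.getD j ' ' = '"' ∨ cs.getD j ' ' = '\'')
    · obtain ⟨f2', rfl⟩ : ∃ f2', f2 = f2' + 1 := ⟨f2 - 1, by omega⟩
      rw [pvFindQ, pvFindQ, if_pos hc, if_pos hc]
      exact ihf f2' (j + 1) (by omega) (by omega)
    · cases f2 with
      | zero => rw [pvFindQ, pvFindQ, if_neg hc]
      | succ f2 => rw [pvFindQ, pvFindQ, if_neg hc, if_neg hc]

theorem pvFindQ_stop (cs : List Char) (n : Nat) (f j : Nat)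
    (h : ¬(j < n ∧ ¬(cs.getD j ' ' = '"' ∨ cs.getD j ' ' = '\''))) :
    pvFindQ cs n f j = j := by
  cases f with
  | zero => rfl
  | succ f => rw [pvFindQ, if_neg h]

theorem pvFindQ_step (cs : List Char) (n : Nat) (f j : Nat)
    (h : j < n ∧ ¬(cs.getD j ' ' = '"' ∨ cs.getD j ' ' = '\'')) :
    pvFindQ cs n (f + 1) j = pvFindQ cs n f (j + 1) := by
  rw [pvFindQ, if_pos h]

theorem pvSkipK_ge (cs : List Char) (n : Nat) (q : Char) :
    ∀ (f k : Nat), k ≤ pvSkipK cs n q f k := by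
  intro f
  induction f with
  | zero => intro k; exact le_refl k
  | succ f ihf =>
    intro k
    rw [pvSkipK]
    by_cases hk : k < n
    · rw [if_pos hk]
      by_cases h1 : cs.getD k ' ' = '\\'
      · rw [if_pos h1]; have := ihf (k + 2); omega
      · rw [if_neg h1]
        by_cases h2 : cs.getD k ' ' = q
        · rw [if_pos h2]; omega
        · rw [if_neg h2]; have := ihf (k + 1); omega
    · rw [if_neg hk]

theorem pvSkipK_congr (cs : List Char) (n : Nat) (q : Char) :
    ∀ (f1 f2 k : Nat), n ≤ k + f1 → n ≤ k + f2 →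
      pvSkipK cs n q f1 k = pvSkipK cs n q f2 k := by
  intro f1
  induction f1 with
  | zero =>
    intro f2 k h1 h2
    have hk : ¬ k < n := by omega
    cases f2 with
    | zero => rfl
    | succ f2 => rw [pvSkipK, pvSkipK, if_neg hk]
  | succ f1 ihf =>
    intro f2 k h1 h2
    by_cases hk : k < n
    · obtain ⟨f2', rfl⟩ : ∃ f2', f2 = f2' + 1 := ⟨f2 - 1, by omega⟩
      rw [pvSkipK, pvSkipK, if_pos hk, if_pos hk]
      by_cases hb : cs.getD k ' ' = '\\'
      · rw [if_pos hb, if_pos hb]; exact ihf f2' (k + 2) (by omega) (by omega)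
      · rw [if_neg hb, if_neg hb]
        by_cases hq : cs.getD k ' ' = q
        · rw [if_pos hq, if_pos hq]
        · rw [if_neg hq, if_neg hq]; exact ihf f2' (k + 1) (by omega) (by omega)
    · cases f2 with
      | zero => rw [pvSkipK, pvSkipK, if_neg hk]
      | succ f2 => rw [pvSkipK, pvSkipK, if_neg hk, if_neg hk]

-- canonical skip: fuel = n
def pvSkip (cs : List Char) (k : Nat) (q : Char) : Nat :=
  pvSkipK cs cs.length q cs.length k

theorem pvSkip_stop (cs : List Char) (k : Nat) (q : Char) (h : ¬ k < cs.length) :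
    pvSkip cs k q = k := by
  unfold pvSkip
  cases hl : cs.length with
  | zero => rfl
  | succ m => rw [pvSkipK, if_neg (by omega)]

theorem pvSkip_bs (cs : List Char) (k : Nat) (q : Char) (hk : k < cs.length)
    (hb : cs.getD k ' ' = '\\') : pvSkip cs k q = pvSkip cs (k + 2) q := by
  unfold pvSkip
  obtain ⟨m, hl⟩ : ∃ m, cs.length = m + 1 := ⟨cs.length - 1, by omega⟩
  rw [hl, pvSkipK, if_pos (by omega), if_pos hb]
  exact pvSkipK_congr cs (m + 1) q m (m + 1) (k + 2) (by omega) (by omega)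

theorem pvSkip_quote (cs : List Char) (k : Nat) (q : Char) (hk : k < cs.length)
    (hb : ¬ cs.getD k ' ' = '\\') (hq : cs.getD k ' ' = q) : pvSkip cs k q = k + 1 := by
  unfold pvSkip
  obtain ⟨m, hl⟩ : ∃ m, cs.length = m + 1 := ⟨cs.length - 1, by omega⟩
  rw [hl, pvSkipK, if_pos (by omega), if_neg hb, if_pos hq]

theorem pvSkip_other (cs : List Char) (k : Nat) (q : Char) (hk : k < cs.length)
    (hb : ¬ cs.getD k ' ' = '\\') (hq : ¬ cs.getD k ' ' = q) :
    pvSkip cs k q = pvSkip cs (k + 1) q := by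
  unfold pvSkip
  obtain ⟨m, hl⟩ : ∃ m, cs.length = m + 1 := ⟨cs.length - 1, by omega⟩
  rw [hl, pvSkipK, if_pos (by omega), if_neg hb, if_neg hq]
  exact pvSkipK_congr cs (m + 1) q m (m + 1) (k + 1) (by omega) (by omega)

theorem pvRegionsGo_congr (cs : List Char) (n : Nat) :
    ∀ (f1 f2 i : Nat), n ≤ i + f1 → n ≤ i + f2 →
      pvRegionsGo cs n f1 i = pvRegionsGo cs n f2 i := by
  intro f1
  induction f1 with
  | zero =>
    intro f2 i h1 h2
    have hi : ¬ i < n := by omega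
    cases f2 with
    | zero => rfl
    | succ f2 => rw [pvRegionsGo, pvRegionsGo, if_neg hi]
  | succ f1 ihf =>
    intro f2 i h1 h2
    by_cases hi : i < n
    · obtain ⟨f2', rfl⟩ : ∃ f2', f2 = f2' + 1 := ⟨f2 - 1, by omega⟩
      rw [pvRegionsGo, pvRegionsGo, if_pos hi, if_pos hi]
      by_cases hj : n ≤ pvFindQ cs n n i
      · rw [if_pos hj, if_pos hj]
      · rw [if_neg hj, if_neg hj]
        have hji : i ≤ pvFindQ cs n n i := (pvFindQ_spec cs n n i (by omega) (by omega)).1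
        have hsk := pvSkipK_ge cs n (cs.getD (pvFindQ cs n n i) ' ') n (pvFindQ cs n n i + 1)
        congr 1
        exact ihf f2' _ (by omega) (by omega)
    · cases f2 with
      | zero => rw [pvRegionsGo, pvRegionsGo, if_neg hi]
      | succ f2 => rw [pvRegionsGo, pvRegionsGo, if_neg hi, if_neg hi]

theorem pvEvF_stop (cs : List Char) (k : Nat) (h : ¬ k < cs.length) : pvEvF cs k = [] := by
  unfold pvEvF
  rw [pvRegionsGo, if_neg h]
  rfl

theorem pvEvF_quote (cs : List Char) (k : Nat) (hk : k < cs.length)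
    (hq : cs.getD k ' ' = '"' ∨ cs.getD k ' ' = '\'') :
    pvEvF cs k = pvEvF cs (pvSkip cs (k + 1) (cs.getD k ' ')) := by
  unfold pvEvF pvSkip
  rw [pvRegionsGo, if_pos hk, pvFindQ_stop cs cs.length cs.length k (by tauto),
    if_neg (by omega)]
  have hge := pvSkipK_ge cs cs.length (cs.getD k ' ') cs.length (k + 1)
  rw [pvRegionsGo_congr cs cs.length cs.length (cs.length + 1) _ (by omega) (by omega)]
  unfold pvEvents
  rw [List.flatMap_cons]
  simp

theorem pvEvF_other (cs : List Char) (k : Nat) (hk : k < cs.length)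
    (hq : ¬(cs.getD k ' ' = '"' ∨ cs.getD k ' ' = '\'')) :
    pvEvF cs k =
      (if cs.getD k ' ' = '{' ∨ cs.getD k ' ' = '}' then [(k, cs.getD k ' ')] else [])
        ++ pvEvF cs (k + 1) := by
  have hspec := pvFindQ_spec cs cs.length cs.length (k + 1) (by omega) (by omega)
  have hjk : pvFindQ cs cs.length cs.length k = pvFindQ cs cs.length cs.length (k + 1) := by
    have h1 : pvFindQ cs cs.length cs.length k = pvFindQ cs cs.length (cs.length - 1 + 1) k := by
      congr 1; omega
    rw [h1, pvFindQ_step cs cs.length (cs.length - 1) k ⟨hk, hq⟩]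
    exact pvFindQ_congr cs cs.length (cs.length - 1) cs.length (k + 1) (by omega) (by omega)
  set j := pvFindQ cs cs.length cs.length (k + 1) with hj
  obtain ⟨hj1, hj2, hj3⟩ := hspec
  unfold pvEvF
  rw [pvRegionsGo, if_pos hk, hjk]
  have hrange : List.range' k (j - k) = k :: List.range' (k + 1) (j - (k + 1)) := by
    have h : j - k = (j - (k + 1)) + 1 := by omega
    rw [h, List.range'_succ]
  by_cases hjn : cs.length ≤ j
  · rw [if_pos hjn]
    by_cases hk1 : k + 1 < cs.length
    · rw [pvRegionsGo, if_pos hk1, ← hj, if_pos hjn]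
      by_cases hbr : cs.getD k ' ' = '{' ∨ cs.getD k ' ' = '}'
      · simp only [List.getD_eq_getElem?_getD] at hbr; simp [pvEvents, hrange, hbr]
      · simp only [List.getD_eq_getElem?_getD] at hbr; simp [pvEvents, hrange, hbr]
    · rw [pvRegionsGo, if_neg hk1]
      have hempty : j - (k + 1) = 0 := by omega
      by_cases hbr : cs.getD k ' ' = '{' ∨ cs.getD k ' ' = '}'
      · simp only [List.getD_eq_getElem?_getD] at hbr; simp [pvEvents, hrange, hempty, hbr]
      · simp only [List.getD_eq_getElem?_getD] at hbr; simp [pvEvents, hrange, hempty, hbr]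
  · rw [if_neg hjn]
    have hk1 : k + 1 < cs.length := by omega
    rw [pvRegionsGo, if_pos hk1, ← hj, if_neg hjn]
    by_cases hbr : cs.getD k ' ' = '{' ∨ cs.getD k ' ' = '}'
    · simp only [List.getD_eq_getElem?_getD] at hbr; simp [pvEvents, hrange, hbr]
    · simp only [List.getD_eq_getElem?_getD] at hbr; simp [pvEvents, hrange, hbr]

theorem pv_cons_int (k : Nat) : ((k : Int) + 1) = ((k + 1 : Nat) : Int) := by push_cast; ring

theorem pv_dropWhile_of_head (p : Char → Bool) (l : List Char) (x : Char)
    (hx : l.head? = some x) (hp : p x = false) : l.dropWhile p = l := by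
  cases l with
  | nil => simp at hx
  | cons a t =>
    simp only [List.head?_cons, Option.some.injEq] at hx
    subst hx
    simp [hp]

theorem pv_strip_id (l : List Char) (h1 : l.head? = some '{') (h2 : l.getLast? = some '}') :
    PySem.Chars.strip l = l := by
  unfold PySem.Chars.strip PySem.Chars.lstrip PySem.Chars.rstrip
  rw [pv_dropWhile_of_head _ l '{' h1 (by decide)]
  rw [pv_dropWhile_of_head _ l.reverse '}' (by rw [List.head?_reverse]; exact h2) (by decide)]
  exact List.reverse_reverse l

theorem pv_seg_head (cs : List Char) (s k : Nat) (hsk : s ≤ k) (_hk : k < cs.length)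
    (hs : cs[s]? = some '{') :
    ((cs.drop s).take (k + 1 - s)).head? = some '{' := by
  rw [List.head?_eq_getElem?, List.getElem?_take_of_lt (by omega), List.getElem?_drop]
  simpa using hs

theorem pv_seg_last (cs : List Char) (s k : Nat) (hsk : s ≤ k) (hk : k < cs.length)
    (hkc : cs[k]? = some '}') :
    ((cs.drop s).take (k + 1 - s)).getLast? = some '}' := by
  have hlen : ((cs.drop s).take (k + 1 - s)).length = k + 1 - s := by
    simp [List.length_take, List.length_drop]; omega
  rw [List.getLast?_eq_getElem?, hlen]
  rw [List.getElem?_take_of_lt (by omega), List.getElem?_drop]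
  have : s + (k + 1 - s - 1) = k := by omega
  rw [this]; exact hkc

theorem pv_main (cs : List Char) :
    ∀ (fuel k d s : Nat) (objs : List String) (q : Char),
      cs.length ≤ k + fuel →
      (d ≠ 0 → s < k ∧ s < cs.length ∧ cs[s]? = some '{') →
      (((PySem.List.enumerate (cs.drop k) (k : Int)).foldl (pvAStep cs)
          (objs, (d : Int), (if d = 0 then none else some (s : Int)), false, none, false)).1
        = ((pvEvF cs k).foldl (pvBStep cs) (objs, d, s)).1
      ∧ ((PySem.List.enumerate (cs.drop k) (k : Int)).foldl (pvAStep cs)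
          (objs, (d : Int), (if d = 0 then none else some (s : Int)), true, some q, false)).1
        = ((pvEvF cs (pvSkip cs k q)).foldl (pvBStep cs) (objs, d, s)).1) := by
  intro fuel
  induction fuel with
  | zero =>
    intro k d s objs q hf hinv
    have hk : ¬ k < cs.length := by omega
    have hdrop : cs.drop k = [] := List.drop_of_length_le (by omega)
    rw [hdrop]
    constructor
    · simp only [PySem.List.enumerate_nil, List.foldl_nil]
      rw [pvEvF_stop cs k hk]; rfl
    · simp only [PySem.List.enumerate_nil, List.foldl_nil]
      rw [pvSkip_stop cs k q hk, pvEvF_stop cs k hk]; rfl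
  | succ f ihf =>
    intro k d s objs q hf hinv
    by_cases hk : k < cs.length
    case neg =>
      have hdrop : cs.drop k = [] := List.drop_of_length_le (by omega)
      rw [hdrop]
      constructor
      · simp only [PySem.List.enumerate_nil, List.foldl_nil]
        rw [pvEvF_stop cs k hk]; rfl
      · simp only [PySem.List.enumerate_nil, List.foldl_nil]
        rw [pvSkip_stop cs k q hk, pvEvF_stop cs k hk]; rfl
    case pos =>
    have hc : cs[k]? = some cs[k] := List.getElem?_eq_getElem hk
    set c := cs[k] with hcdef
    have hcD : cs.getD k ' ' = c := by rw [List.getD_eq_getElem?_getD, hc]; rfl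
    have hdrop : cs.drop k = c :: cs.drop (k + 1) := List.drop_eq_getElem_cons hk
    constructor
    · -- normal mode
      rw [hdrop, PySem.List.enumerate_cons, List.foldl_cons, pv_cons_int]
      by_cases hq : c = '"' ∨ c = '\''
      · -- quote: A enters string mode; B's event list skips the literal
        have hstep : pvAStep cs (objs, (d : Int), (if d = 0 then none else some (s : Int)),
            false, none, false) ((k : Int), c)
            = (objs, (d : Int), (if d = 0 then none else some (s : Int)), true, some c, false) := by
          simp [pvAStep, hq]
        rw [hstep]
        rw [pvEvF_quote cs k hk (by rw [hcD]; exact hq), hcD]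
        exact (ihf (k + 1) d s objs c (by omega)
          (fun hd => ⟨(hinv hd).1.trans (by omega), (hinv hd).2.1, (hinv hd).2.2⟩)).2
      · rw [pvEvF_other cs k hk (by rw [hcD]; exact hq), hcD]
        by_cases hbr : c = '{'
        · have hbrc : c = '{' ∨ c = '}' := Or.inl hbr
          rw [if_pos hbrc, List.singleton_append, List.foldl_cons]
          have hstepB : pvBStep cs (objs, d, s) (k, c)
              = (objs, d + 1, if d = 0 then k else s) := by
            simp [pvBStep, hbr]
          rw [hstepB]
          have hstep : pvAStep cs (objs, (d : Int), (if d = 0 then none else some (s : Int)),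
              false, none, false) ((k : Int), c)
              = (objs, ((d + 1 : Nat) : Int),
                 (if (d + 1 : Nat) = 0 then none else some (((if d = 0 then k else s) : Nat) : Int)),
                 false, none, false) := by
            by_cases hd : d = 0
            · subst hd; simp [pvAStep, hbr]
            · have hdi : ¬ ((d : Int) = 0) := by exact_mod_cast hd
              simp only [pvAStep]
              rw [if_neg (by simp), if_neg (by simpa using hq), if_pos hbr,
                if_neg hdi, if_neg hd]
              rw [if_neg (by omega : ¬ (d + 1 = 0))]
              have : (d : Int) + 1 = ((d + 1 : Nat) : Int) := by push_cast; ring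
              rw [this, if_neg hd]
          rw [hstep]
          refine (ihf (k + 1) (d + 1) (if d = 0 then k else s) objs q (by omega) ?_).1
          intro _
          by_cases hd : d = 0
          · simp only [if_pos hd]
            exact ⟨by omega, hk, hbr ▸ hc⟩
          · simp only [if_neg hd]
            exact ⟨(hinv hd).1.trans (by omega), (hinv hd).2.1, (hinv hd).2.2⟩
        · by_cases hcl : c = '}' ∧ 0 < d
          · have hbrc : c = '{' ∨ c = '}' := Or.inr hcl.1
            rw [if_pos hbrc, List.singleton_append, List.foldl_cons]
            have hd : d ≠ 0 := by omega
            obtain ⟨hsk, hsn, hsbrace⟩ := hinv hd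
            have hkc : cs[k]? = some '}' := by rw [hc, hcl.1]
            have hseg : PySem.Chars.strip (PySem.List.slice cs (some (s : Int))
                (some ((k : Int) + 1))) = (cs.drop s).take (k + 1 - s) := by
              rw [pv_cons_int, PySem.List.slice_natCast]
              exact pv_strip_id _ (pv_seg_head cs s k (by omega) hk hsbrace)
                (pv_seg_last cs s k (by omega) hk hkc)
            have hne : (cs.drop s).take (k + 1 - s) ≠ [] := by
              intro h
              have := pv_seg_head cs s k (by omega) hk hsbrace
              rw [h] at this; simp at this
            by_cases hd1 : d = 1
            · subst hd1
              have hstepB : pvBStep cs (objs, 1, s) (k, c)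
                  = (objs ++ [String.ofList ((cs.drop s).take (k + 1 - s))], 0, s) := by
                simp [pvBStep, hcl.1]
              rw [hstepB]
              have hstep : pvAStep cs (objs, ((1 : Nat) : Int), (if (1 : Nat) = 0 then none else some (s : Int)),
                  false, none, false) ((k : Int), c)
                  = (objs ++ [String.ofList ((cs.drop s).take (k + 1 - s))],
                     ((0 : Nat) : Int), (if (0 : Nat) = 0 then none else some (s : Int)),
                     false, none, false) := by
                simp only [pvAStep]
                rw [if_neg (by simp), if_neg (by simpa using hq), if_neg (by simpa using hbr),
                  if_pos (by exact ⟨hcl.1, by norm_num⟩)]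
                norm_num
                rw [hseg]
                simp [hne]
              rw [hstep]
              have := (ihf (k + 1) 0 s (objs ++ [String.ofList ((cs.drop s).take (k + 1 - s))]) q
                (by omega) (by intro h; exact absurd rfl h)).1
              rw [if_pos rfl] at this
              exact this
            · have hd2 : ¬ (d - 1 = 0) := by omega
              have hstepB : pvBStep cs (objs, d, s) (k, c) = (objs, d - 1, s) := by
                have hcne : ¬ (c = '{') := hbr
                simp only [pvBStep]
                rw [if_neg hcne, if_pos hcl.2, if_neg hd2]
              rw [hstepB]
              have hstep : pvAStep cs (objs, (d : Int), (if d = 0 then none else some (s : Int)),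
                  false, none, false) ((k : Int), c)
                  = (objs, ((d - 1 : Nat) : Int),
                     (if (d - 1 : Nat) = 0 then none else some (s : Int)), false, none, false) := by
                simp only [pvAStep]
                rw [if_neg (by simp), if_neg (by simpa using hq), if_neg (by simpa using hbr),
                  if_pos (by exact ⟨hcl.1, by exact_mod_cast hcl.2⟩)]
                rw [if_neg (by simp; omega)]
                simp only [if_neg hd, if_neg hd2]
                rw [Int.natCast_sub (by omega : 1 ≤ d)]
                norm_num
              rw [hstep]
              exact (ihf (k + 1) (d - 1) s objs q (by omega)
                (fun _ => ⟨by omega, hsn, hsbrace⟩)).1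
          · -- not '{', and not a closing '}' with positive depth
            have hstep : pvAStep cs (objs, (d : Int), (if d = 0 then none else some (s : Int)),
                false, none, false) ((k : Int), c)
                = (objs, (d : Int), (if d = 0 then none else some (s : Int)), false, none, false) := by
              simp only [pvAStep]
              rw [if_neg (by simp), if_neg (by simpa using hq), if_neg (by simpa using hbr),
                if_neg (by intro h; exact hcl ⟨h.1, by exact_mod_cast h.2⟩)]
            rw [hstep]
            by_cases hbrc : c = '{' ∨ c = '}'
            · -- a '}' at depth 0: the event is present but pvBStep leaves the state unchanged
              have hcr : c = '}' := by tauto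
              have hd0 : d = 0 := by
                by_contra hd
                exact hcl ⟨hcr, by omega⟩
              subst hd0
              rw [if_pos hbrc, List.singleton_append, List.foldl_cons]
              have hstepB : pvBStep cs (objs, 0, s) (k, c) = (objs, 0, s) := by
                simp [pvBStep, hcr]
              rw [hstepB]
              exact (ihf (k + 1) 0 s objs q (by omega) (by intro h; exact absurd rfl h)).1
            · rw [if_neg hbrc, List.nil_append]
              exact (ihf (k + 1) d s objs q (by omega)
                (fun hd => ⟨(hinv hd).1.trans (by omega), (hinv hd).2.1, (hinv hd).2.2⟩)).1
    · -- string mode, quote q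
      rw [hdrop, PySem.List.enumerate_cons, List.foldl_cons, pv_cons_int]
      by_cases hbs : c = '\\'
      · rw [pvSkip_bs cs k q hk (by rw [hcD]; exact hbs)]
        have hstep : pvAStep cs (objs, (d : Int), (if d = 0 then none else some (s : Int)),
            true, some q, false) ((k : Int), c)
            = (objs, (d : Int), (if d = 0 then none else some (s : Int)), true, some q, true) := by
          simp [pvAStep, hbs]
        rw [hstep]
        by_cases hk1 : k + 1 < cs.length
        · have hc1 : cs[k+1]? = some cs[k+1] := List.getElem?_eq_getElem hk1
          have hdrop1 : cs.drop (k + 1) = cs[k+1] :: cs.drop (k + 1 + 1) :=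
            List.drop_eq_getElem_cons hk1
          rw [hdrop1, PySem.List.enumerate_cons, List.foldl_cons, pv_cons_int]
          have hstep2 : pvAStep cs (objs, (d : Int), (if d = 0 then none else some (s : Int)),
              true, some q, true) (((k + 1 : Nat) : Int), cs[k+1])
              = (objs, (d : Int), (if d = 0 then none else some (s : Int)), true, some q, false) := by
            simp [pvAStep]
          rw [hstep2]
          rw [show pvSkip cs (k + 2) q = pvSkip cs (k + 1 + 1) q from rfl]
          exact (ihf (k + 1 + 1) d s objs q (by omega)
            (fun hd => ⟨(hinv hd).1.trans (by omega), (hinv hd).2.1, (hinv hd).2.2⟩)).2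
        · have hdrop1 : cs.drop (k + 1) = [] := List.drop_of_length_le (by omega)
          rw [hdrop1]
          simp only [PySem.List.enumerate_nil, List.foldl_nil]
          rw [pvSkip_stop cs (k + 2) q (by omega), pvEvF_stop cs (k + 2) (by omega)]; rfl
      · by_cases hcq : c = q
        · rw [pvSkip_quote cs k q hk (by rw [hcD]; exact hbs) (by rw [hcD]; exact hcq)]
          have hstep : pvAStep cs (objs, (d : Int), (if d = 0 then none else some (s : Int)),
              true, some q, false) ((k : Int), c)
              = (objs, (d : Int), (if d = 0 then none else some (s : Int)), false, none, false) := by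
            simp [pvAStep, hcq]
            exact hcq ▸ hbs
          rw [hstep]
          exact (ihf (k + 1) d s objs q (by omega)
            (fun hd => ⟨(hinv hd).1.trans (by omega), (hinv hd).2.1, (hinv hd).2.2⟩)).1
        · rw [pvSkip_other cs k q hk (by rw [hcD]; exact hbs) (by rw [hcD]; exact hcq)]
          have hstep : pvAStep cs (objs, (d : Int), (if d = 0 then none else some (s : Int)),
              true, some q, false) ((k : Int), c)
              = (objs, (d : Int), (if d = 0 then none else some (s : Int)), true, some q, false) := by
            simp [pvAStep, hbs, hcq]
          rw [hstep]
          exact (ihf (k + 1) d s objs q (by omega)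
            (fun hd => ⟨(hinv hd).1.trans (by omega), (hinv hd).2.1, (hinv hd).2.2⟩)).2

-- ===== VERDICT (by name: the statement is the Claim_ definition above) =====
theorem extract_top_level_objects_spec : Claim_equal_extract_top_level_objects := by
  intro text _
  unfold Spec_extract_top_level_objects extract_top_level_objects extract_top_level_objects_alt
  by_cases h : text = ""
  · subst h
    decide
  · rw [if_neg h]
    have hm := (pv_main text.toList text.toList.length 0 0 0 [] '"'
      (by omega) (by intro hd; exact absurd rfl hd)).1
    simp only [List.drop_zero, Nat.cast_zero] at hm
    show _ = ((pvEvents text.toList (pvRegionsGo text.toList text.toList.length (text.toList.length + 1) 0)).foldl (pvBStep text.toList) ([], 0, 0)).1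
    exact hm
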